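-- pv_equiv track=rewrite | github.com/pierreb0501/4D-treasure-map-game | treasure_utils.py | change_char_in_3D_map
-- ===== SOURCE A (Python) =====
-- EMPTY_SYMBOL = '.'
--
-- def change_char_in_map(treasure_map_string, row, column, character_c, width, height):
--     '''(str, int, int, int, int, int) -> str
--     takes a treasure map string, integer row and column index, character c, and integer width and hight as inputs
--     returns a copy of the treasure map string with the character c at the given row and column index
--
--     >>> change_char_in_map('.........', 1, 1, 'X', 3, 3)
--     '....X....'
--
--     >>> change_char_in_map('><..vv>^.<>>', 2, 1, 'X', 3, 4)
--     '><..vv>X.<>>'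
--
--     >>> change_char_in_map('>vv.', 0, 0, 'X', 2, 2)
--     'Xvv.'
--     '''
--     if 0 <= row < height and 0 <= column < width:
--         select_index = (row * width) + column
--         text = treasure_map_string[:select_index] + character_c + treasure_map_string[select_index + 1:]
--         return (text)
--     else:
--         return (treasure_map_string)
--
-- def get_nth_map_from_3D_map (treasure_map_string, n, width, height, depth):
--     '''(str, int, int, int, int) -> str
--     takes a treasure map string, integer n, width, height and depth as inputs
--     returns the n'th row of a treasure map
--
--     >>> get_nth_map_from_3D_map('.X.XXX.X..v.vXv.v.', 0, 3, 3, 2)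
--     '.X.XXX.X.'
--
--     >>> get_nth_map_from_3D_map('.v...vvv..v.vX..', 2, 2, 2, 3)
--     '..v.'
--
--     >>> get_nth_map_from_3D_map('.........', 4, 3, 3, 2)
--     '.'
--     '''
--     if 0 <= n < depth :
--         map = treasure_map_string [n * width * height : n  * width * height + width * height]
--         return map
--     else:
--         return EMPTY_SYMBOL
--
-- def change_char_in_3D_map(treasure_map_string, row, column, depth_index, character_c, width, height, depth):
--     '''(str, int, int, int, int, int, int, int) -> str
--     takes a 3D treasure map string, integer row, column and depth index, character c, and integer width, height and depth as inputs
--     returns a copy of the 3D treasure map string with the character c at the given row, column and depth index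
--
--     >>> change_char_in_3D_map('.X.XXX.X..v.vXv.v.', 0, 0, 0, '#', 3, 3, 2)
--     '#X.XXX.X..v.vXv.v.'
--
--     >>> change_char_in_3D_map('..................', 1, 1, 1, '#', 3, 3, 2)
--     '.............#....'
--
--     >>> change_char_in_3D_map('...............', 1, 1, 1, '%', 3, 5, 3)
--     '...............%'
--     '''
--     map = ''
--     for n in range (depth):
--         if n != depth_index:
--             map += get_nth_map_from_3D_map(treasure_map_string, n, width, height, depth)
--         else:
--             old_map = get_nth_map_from_3D_map(treasure_map_string, n, width, height, depth)
--             map += change_char_in_map(old_map, row, column, character_c, width, height)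
--
--     return map
-- ===== SOURCE B (Python) =====
-- def change_char_in_3D_map(treasure_map_string, row, column, depth_index, character_c, width, height, depth):
--     layer_size = width * height
--     treasure_map = treasure_map_string[: layer_size * depth]
--     if 0 <= row < height and 0 <= column < width and 0 <= depth_index < depth:
--         i = depth_index * layer_size + row * width + column
--         return treasure_map[:i] + character_c + treasure_map[i + 1:]
--     return treasure_map
-- ===== Notes on version B (the rewrite author's own statement) =====
-- stated objective: faster
-- what changed: Instead of looping over all depth layers and concatenating a slice per layer, B truncates the string once to the map's width*height*depth cells and does a single splice at the directly computed global flat index; Pre_ excludes only degenerate negative-dimension inputs (negative layer size or negative depth whose wrapped slice bounds still fall inside the string), where A's Python-style negative slice wraparound returns accidental fragments of the string.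
-- outside the precondition, e.g. on change_char_in_3D_map('abcdef', 0, 0, 0, 'X', 2, 1, -1): A returns '', B returns 'abcd'; on change_char_in_3D_map('abcdef', 0, 0, 0, 'X', -1, 2, 2): A returns 'abcd', B returns 'ab'
import Mathlib
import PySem

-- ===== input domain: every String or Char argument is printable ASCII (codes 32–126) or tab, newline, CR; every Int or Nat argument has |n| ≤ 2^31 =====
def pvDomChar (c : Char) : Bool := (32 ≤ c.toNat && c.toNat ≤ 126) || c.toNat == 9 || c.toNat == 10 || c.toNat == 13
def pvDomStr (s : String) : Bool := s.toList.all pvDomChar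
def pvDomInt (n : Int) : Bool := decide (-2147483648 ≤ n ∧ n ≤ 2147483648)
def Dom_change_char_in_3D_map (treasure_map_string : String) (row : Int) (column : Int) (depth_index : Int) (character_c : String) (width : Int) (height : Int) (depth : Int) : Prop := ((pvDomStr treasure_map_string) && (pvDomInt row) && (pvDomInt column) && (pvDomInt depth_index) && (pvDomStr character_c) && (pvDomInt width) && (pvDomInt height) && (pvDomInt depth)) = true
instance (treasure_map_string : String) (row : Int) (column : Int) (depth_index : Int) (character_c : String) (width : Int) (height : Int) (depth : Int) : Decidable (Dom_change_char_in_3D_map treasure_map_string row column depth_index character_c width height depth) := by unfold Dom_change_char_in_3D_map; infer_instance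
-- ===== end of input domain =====

-- B replaces A's per-layer loop of slices by one truncation plus one splice at the
-- directly computed global flat index (objective: faster, asymptotically O(n) vs O(depth*n)).


-- ===== PORT A =====
-- EMPTY_SYMBOL = '.'
def pvA_change_char_in_map (treasure_map_string : String) (row column : Int) (character_c : String) (width height : Int) : String :=
  if 0 ≤ row ∧ row < height ∧ 0 ≤ column ∧ column < width then
    let select_index := row * width + column
    PySem.Str.slice treasure_map_string none (some select_index) ++ character_c ++
      PySem.Str.slice treasure_map_string (some (select_index + 1)) none
  else treasure_map_string

def pvA_get_nth_map_from_3D_map (treasure_map_string : String) (n width height depth : Int) : String :=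
  if 0 ≤ n ∧ n < depth then
    PySem.Str.slice treasure_map_string (some (n * width * height)) (some (n * width * height + width * height))
  else "."

def change_char_in_3D_map (treasure_map_string : String) (row : Int) (column : Int) (depth_index : Int) (character_c : String) (width : Int) (height : Int) (depth : Int) : String :=
  (PySem.List.pyRange 0 depth 1).foldl (fun map n =>
    if n ≠ depth_index then
      map ++ pvA_get_nth_map_from_3D_map treasure_map_string n width height depth
    else
      map ++ pvA_change_char_in_map (pvA_get_nth_map_from_3D_map treasure_map_string n width height depth)
              row column character_c width height) ""

-- ===== PORT B =====
def change_char_in_3D_map_alt (treasure_map_string : String) (row : Int) (column : Int) (depth_index : Int) (character_c : String) (width : Int) (height : Int) (depth : Int) : String :=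
  let layer_size := width * height
  let treasure_map := PySem.Str.slice treasure_map_string none (some (layer_size * depth))
  if 0 ≤ row ∧ row < height ∧ 0 ≤ column ∧ column < width ∧ 0 ≤ depth_index ∧ depth_index < depth then
    let i := depth_index * layer_size + row * width + column
    PySem.Str.slice treasure_map none (some i) ++ character_c ++
      PySem.Str.slice treasure_map (some (i + 1)) none
  else treasure_map

-- ===== PRECONDITION & SPEC =====
-- Pre_ excludes the degenerate negative-dimension inputs (negative layer size width*height or
-- negative depth whose wrapped slice bounds still fall inside the string): there A's negative
-- slice bounds wrap around Python-style and its layer concatenations return accidental fragments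
-- of the string; kept inside are the natural domain (nonnegative layer size and depth) and the
-- negative-dimension inputs whose slices are all empty, where both programs return ''.
def Pre_change_char_in_3D_map (treasure_map_string : String) (row : Int) (column : Int) (depth_index : Int) (character_c : String) (width : Int) (height : Int) (depth : Int) : Prop :=
  (0 ≤ width * height ∧ 0 ≤ depth) ∨ width * height * depth = 0 ∨
    (depth < 0 ∧ width * height * depth ≤ -(PySem.Str.len treasure_map_string)) ∨
    (0 < depth ∧ width * height ≤ -(PySem.Str.len treasure_map_string))
instance (treasure_map_string : String) (row : Int) (column : Int) (depth_index : Int) (character_c : String) (width : Int) (height : Int) (depth : Int) : Decidable (Pre_change_char_in_3D_map treasure_map_string row column depth_index character_c width height depth) := by unfold Pre_change_char_in_3D_map; infer_instance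

def pvWitness_change_char_in_3D_map : String × Int × Int × Int × String × Int × Int × Int :=
  (".X.XXX.X..v.vXv.v.", 1, 1, 1, "#", 3, 3, 2)

def Spec_change_char_in_3D_map (treasure_map_string : String) (row : Int) (column : Int) (depth_index : Int) (character_c : String) (width : Int) (height : Int) (depth : Int) (out : String) : Prop := out = change_char_in_3D_map_alt treasure_map_string row column depth_index character_c width height depth
instance (treasure_map_string : String) (row : Int) (column : Int) (depth_index : Int) (character_c : String) (width : Int) (height : Int) (depth : Int) (out : String) : Decidable (Spec_change_char_in_3D_map treasure_map_string row column depth_index character_c width height depth out) := by unfold Spec_change_char_in_3D_map; infer_instance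

-- ===== CLAIM (what is proved, stated in full; the proofs are below) =====
def Claim_equal_change_char_in_3D_map : Prop := ∀ (treasure_map_string : String) (row : Int) (column : Int) (depth_index : Int) (character_c : String) (width : Int) (height : Int) (depth : Int), Dom_change_char_in_3D_map treasure_map_string row column depth_index character_c width height depth → Pre_change_char_in_3D_map treasure_map_string row column depth_index character_c width height depth → Spec_change_char_in_3D_map treasure_map_string row column depth_index character_c width height depth (change_char_in_3D_map treasure_map_string row column depth_index character_c width height depth)

-- ===== LEMMAS AND PROOFS =====

-- folding string concatenation is flatMap on the character lists
lemma pv_toList_foldl_append (l : List Int) (g : Int → String) (acc : String) :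
    (l.foldl (fun m n => m ++ g n) acc).toList = acc.toList ++ l.flatMap (fun n => (g n).toList) := by
  induction l generalizing acc with
  | nil => simp
  | cons x xs ih => simp [ih, String.toList_append]

-- concatenating m consecutive w-blocks of L starting at offset a is one clamped take
lemma pv_flat_blocks (L : List Char) (w : Nat) :
    ∀ (m a : Nat), (List.range m).flatMap (fun n => (L.drop (a + n * w)).take w)
      = (L.drop a).take (m * w) := by
  intro m
  induction m with
  | zero => simp
  | succ m ih =>
    intro a
    rw [List.range_succ, List.flatMap_append, ih]
    have h1 : L.drop (a + m * w) = (L.drop a).drop (m * w) := by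
      rw [List.drop_drop]
    simp only [List.flatMap_cons, List.flatMap_nil, List.append_nil, h1]
    rw [← List.take_add]
    congr 1
    ring

-- the assembled three-part splice equals a single splice on the truncated base
lemma pv_splice (L C : List Char) (w d kk sn : Nat) (hk : kk < d) (hs : sn < w) :
    L.take (kk * w) ++ (((L.drop (kk * w)).take w).take sn ++ C ++ ((L.drop (kk * w)).take w).drop (sn + 1))
      ++ (L.drop ((kk + 1) * w)).take ((d - kk - 1) * w)
    = (L.take (d * w)).take (kk * w + sn) ++ C ++ (L.take (d * w)).drop (kk * w + sn + 1) := by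
  have hkw : (kk + 1) * w ≤ d * w := Nat.mul_le_mul_right w hk
  have hdk : (d - kk - 1) * w + (kk + 1) * w = d * w := by
    rw [← Nat.add_mul]
    congr 1
    omega
  have haw : (kk + 1) * w = kk * w + w := by ring
  have r1 : (L.take (d * w)).take (kk * w + sn) = L.take (kk * w + sn) := by
    rw [List.take_take, Nat.min_eq_left (by omega)]
  have r2 : (L.take (d * w)).drop (kk * w + sn + 1)
      = (L.drop (kk * w + sn + 1)).take (d * w - (kk * w + sn + 1)) := by
    rw [List.drop_take]
  have l1 : ((L.drop (kk * w)).take w).take sn = (L.drop (kk * w)).take sn := by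
    rw [List.take_take, Nat.min_eq_left (by omega)]
  have l2 : L.take (kk * w) ++ (L.drop (kk * w)).take sn = L.take (kk * w + sn) := by
    rw [List.take_add]
  have l3 : ((L.drop (kk * w)).take w).drop (sn + 1)
      = (L.drop (kk * w + sn + 1)).take (w - (sn + 1)) := by
    rw [List.drop_take, List.drop_drop, Nat.add_assoc]
  have l4 : L.drop ((kk + 1) * w) = (L.drop (kk * w + sn + 1)).drop (w - (sn + 1)) := by
    rw [List.drop_drop]
    congr 1
    omega
  have l5 : (L.drop (kk * w + sn + 1)).take (w - (sn + 1))
      ++ ((L.drop (kk * w + sn + 1)).drop (w - (sn + 1))).take ((d - kk - 1) * w)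
      = (L.drop (kk * w + sn + 1)).take (w - (sn + 1) + (d - kk - 1) * w) := by
    rw [List.take_add]
  have l6 : w - (sn + 1) + (d - kk - 1) * w = d * w - (kk * w + sn + 1) := by omega
  rw [r1, r2, l1, l3, l4]
  rw [show ∀ (a b c e f : List Char), a ++ (b ++ c ++ e) ++ f = (a ++ b) ++ (c ++ (e ++ f)) from by
    intro a b c e f; simp [List.append_assoc]]
  rw [l2, l5, l6]
  simp [List.append_assoc]

-- A's loop body, written as one appended string
lemma pv_A_toList (s : String) (row column depth_index : Int) (c : String) (width height depth : Int) :
    (change_char_in_3D_map s row column depth_index c width height depth).toList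
    = (PySem.List.pyRange 0 depth 1).flatMap (fun n =>
        (if n ≠ depth_index then pvA_get_nth_map_from_3D_map s n width height depth
         else pvA_change_char_in_map (pvA_get_nth_map_from_3D_map s n width height depth)
                row column c width height).toList) := by
  unfold change_char_in_3D_map
  rw [show (fun (map : String) (n : Int) =>
        if n ≠ depth_index then
          map ++ pvA_get_nth_map_from_3D_map s n width height depth
        else
          map ++ pvA_change_char_in_map (pvA_get_nth_map_from_3D_map s n width height depth)
                  row column c width height)
      = (fun (map : String) (n : Int) => map ++
          (if n ≠ depth_index then pvA_get_nth_map_from_3D_map s n width height depth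
           else pvA_change_char_in_map (pvA_get_nth_map_from_3D_map s n width height depth)
                  row column c width height)) from by
    funext m n; split <;> rfl]
  rw [pv_toList_foldl_append]
  simp

-- the n'th-layer helper, inside the loop range, is a block of the character list
lemma pv_block_toList (s : String) (width height depth : Int) (w : Nat)
    (hw : width * height = (w : Int)) (j : Nat) (hj : (j : Int) < depth) :
    (pvA_get_nth_map_from_3D_map s (j : Int) width height depth).toList
    = (s.toList.drop (j * w)).take w := by
  unfold pvA_get_nth_map_from_3D_map
  rw [if_pos ⟨Int.natCast_nonneg j, hj⟩]
  rw [PySem.Str.toList_slice, PySem.Chars.slice_eq_listSlice]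
  rw [show ((j : Int) * width * height) = ((j * w : Nat) : Int) by
    rw [mul_assoc, hw]; push_cast; ring]
  rw [show (((j * w : Nat) : Int) + width * height) = ((j * w + w : Nat) : Int) by
    rw [hw]; push_cast; ring]
  rw [PySem.List.slice_natCast]
  congr 1
  omega

-- slice s[:t] is empty when t = 0 or t reaches at or before the front of the list
lemma pv_slice_to_empty (L : List Char) (t : Int) (h : t = 0 ∨ t ≤ -(L.length : Int)) :
    PySem.List.slice L none (some t) = [] := by
  by_cases h0 : t = 0
  · subst h0
    rw [PySem.List.slice_to _ le_rfl]
    simp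
  · have ht : t ≤ -(L.length : Int) := by tauto
    have hk : t = -(((-t).toNat : Nat) : Int) := by omega
    rw [hk, PySem.List.slice_to_neg_natCast _ _ (by omega)]
    have hz : L.length - (-t).toNat = 0 := by omega
    rw [hz]
    simp

-- slice s[a:b] is empty when b reaches at or before the front of the list
lemma pv_slice_ab_empty (L : List Char) (a b : Int) (hb : b ≤ -(L.length : Int)) (hbneg : b < 0) :
    PySem.List.slice L (some a) (some b) = [] := by
  apply List.eq_nil_of_length_eq_zero
  rw [PySem.List.length_slice]
  have hk : b = -(((-b).toNat : Nat) : Int) := by omega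
  rw [hk, PySem.List.clampIdx_neg_natCast _ _ (by omega)]
  omega

-- the main case: nonnegative layer size and depth
lemma pv_main (s : String) (row column k : Int) (c : String) (width height depth : Int)
    (hwh : 0 ≤ width * height) (hd : 0 ≤ depth) :
    (change_char_in_3D_map s row column k c width height depth).toList
    = (change_char_in_3D_map_alt s row column k c width height depth).toList := by
  obtain ⟨w, hw⟩ : ∃ w : Nat, width * height = (w : Int) :=
    ⟨(width * height).toNat, (Int.toNat_of_nonneg hwh).symm⟩
  obtain ⟨d, hdep⟩ : ∃ d : Nat, depth = (d : Int) := ⟨depth.toNat, (Int.toNat_of_nonneg hd).symm⟩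
  set L := s.toList with hL
  rw [pv_A_toList]
  rw [show PySem.List.pyRange 0 depth 1 = (List.range d).map (fun j : Nat => (j : Int)) from by
    rw [hdep]; exact PySem.List.pyRange_zero_natCast d]
  rw [List.flatMap_map]
  have htotv : width * height * depth = ((w * d : Nat) : Int) := by
    rw [hw, hdep]; push_cast; ring
  have hbaseL : PySem.List.slice s.toList none (some (width * height * depth)) = L.take (d * w) := by
    rw [PySem.List.slice_to _ (by rw [htotv]; exact Int.natCast_nonneg _), htotv,
        Int.toNat_natCast, Nat.mul_comm w d]
  by_cases hit : 0 ≤ row ∧ row < height ∧ 0 ≤ column ∧ column < width ∧ 0 ≤ k ∧ k < depth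
  · -- the replaced cell exists: split the loop at the hit layer
    obtain ⟨hr0, hrh, hc0, hcw, hk0, hkd⟩ := hit
    obtain ⟨kk, hkk⟩ : ∃ kk : Nat, k = (kk : Int) := ⟨k.toNat, by omega⟩
    have hkkd : kk < d := by omega
    have hwpos : (0 : Int) < width * height := by nlinarith
    set si : Int := row * width + column with hsi
    have hsi0 : 0 ≤ si := by
      rw [hsi]
      have : (0:Int) < width := lt_of_le_of_lt hc0 hcw
      exact add_nonneg (mul_nonneg hr0 (le_of_lt this)) hc0
    have hsiw : si < width * height := by nlinarith
    obtain ⟨sn, hsn⟩ : ∃ sn : Nat, si = (sn : Int) := ⟨si.toNat, by omega⟩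
    have hsnw : sn < w := by omega
    have hsplit : List.range d
        = (List.range kk ++ [kk]) ++ (List.range (d - kk - 1)).map (fun x => kk + 1 + x) := by
      rw [← List.range_succ, ← List.range_add]
      congr 1
      omega
    rw [hsplit, List.flatMap_append, List.flatMap_append, List.flatMap_map]
    rw [List.flatMap_congr (l := List.range kk)
          (g := fun j => (L.drop (j * w)).take w)
          (by
            intro j hj
            have hjk : j < kk := List.mem_range.mp hj
            rw [if_pos (by rw [hkk]; exact_mod_cast Nat.ne_of_lt hjk),
                pv_block_toList s width height depth w hw j (by omega)])]
    have hfb1 := pv_flat_blocks L w kk 0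
    simp only [Nat.zero_add, List.drop_zero] at hfb1
    rw [hfb1]
    rw [List.flatMap_congr (l := List.range (d - kk - 1))
          (g := fun j => (L.drop ((kk + 1) * w + j * w)).take w)
          (by
            intro j hj
            rw [if_pos (by rw [hkk]; intro heq; have := Int.ofNat.inj heq; omega),
                pv_block_toList s width height depth w hw (kk + 1 + j) (by
                  have := List.mem_range.mp hj; omega)]
            have : (kk + 1 + j) * w = (kk + 1) * w + j * w := by ring
            rw [this])]
    rw [pv_flat_blocks L w (d - kk - 1) ((kk + 1) * w)]
    have hhit : (if (kk : Int) ≠ k then pvA_get_nth_map_from_3D_map s (kk : Int) width height depth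
        else pvA_change_char_in_map (pvA_get_nth_map_from_3D_map s (kk : Int) width height depth)
               row column c width height).toList
        = ((L.drop (kk * w)).take w).take sn ++ c.toList ++ ((L.drop (kk * w)).take w).drop (sn + 1) := by
      rw [if_neg (by rw [hkk]; simp)]
      unfold pvA_change_char_in_map
      rw [if_pos ⟨hr0, hrh, hc0, hcw⟩]
      rw [String.toList_append, String.toList_append]
      rw [PySem.Str.toList_slice, PySem.Str.toList_slice,
          PySem.Chars.slice_eq_listSlice, PySem.Chars.slice_eq_listSlice]
      rw [PySem.List.slice_to _ hsi0, PySem.List.slice_from _ (by omega : 0 ≤ si + 1)]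
      rw [pv_block_toList s width height depth w hw kk (by omega)]
      have e1 : si.toNat = sn := by omega
      have e2 : (si + 1).toNat = sn + 1 := by omega
      rw [e1, e2]
    simp only [List.flatMap_cons, List.flatMap_nil, List.append_nil]
    rw [hhit]
    rw [pv_splice L c.toList w d kk sn hkkd hsnw]
    -- B's single splice on the truncated map
    simp only [change_char_in_3D_map_alt]
    rw [if_pos ⟨hr0, hrh, hc0, hcw, hk0, hkd⟩]
    have hi : k * (width * height) + row * width + column = ((kk * w + sn : Nat) : Int) := by
      rw [hkk, hw]
      push_cast
      have : row * width + column = ((sn : Nat) : Int) := by rw [← hsi, hsn]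
      linarith [this]
    simp only [String.toList_append, PySem.Str.toList_slice, PySem.Chars.slice_eq_listSlice]
    rw [hbaseL]
    rw [PySem.List.slice_to _ (by rw [hi]; exact Int.natCast_nonneg _),
        PySem.List.slice_from _ (by rw [hi]; positivity)]
    have e1 : (k * (width * height) + row * width + column).toNat = kk * w + sn := by
      rw [hi]; omega
    have e2 : (k * (width * height) + row * width + column + 1).toNat = kk * w + sn + 1 := by
      rw [hi]; omega
    rw [e1, e2]
  · -- no cell is replaced: both sides are the truncated map
    rw [List.flatMap_congr (l := List.range d)
          (g := fun j => (L.drop (j * w)).take w)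
          (by
            intro j hj
            have hjd : (j : Int) < depth := by
              have := List.mem_range.mp hj; omega
            by_cases hji : (j : Int) ≠ k
            · rw [if_pos hji, pv_block_toList s width height depth w hw j hjd]
            · rw [if_neg hji]
              rw [not_not] at hji
              unfold pvA_change_char_in_map
              rw [if_neg (by
                rintro ⟨h1, h2, h3, h4⟩
                exact hit ⟨h1, h2, h3, h4, by omega, by omega⟩)]
              rw [pv_block_toList s width height depth w hw j hjd])]
    have hfb2 := pv_flat_blocks L w d 0
    simp only [Nat.zero_add, List.drop_zero] at hfb2
    rw [hfb2]
    simp only [change_char_in_3D_map_alt]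
    rw [if_neg hit]
    rw [PySem.Str.toList_slice, PySem.Chars.slice_eq_listSlice, hbaseL]

-- the degenerate cases admitted by Pre_ outside the main case: both programs return ''
lemma pv_corner (s : String) (row column k : Int) (c : String) (width height depth : Int)
    (hmain : ¬(0 ≤ width * height ∧ 0 ≤ depth))
    (hpre : width * height * depth = 0 ∨
      (depth < 0 ∧ width * height * depth ≤ -(PySem.Str.len s)) ∨
      (0 < depth ∧ width * height ≤ -(PySem.Str.len s))) :
    (change_char_in_3D_map s row column k c width height depth).toList
    = (change_char_in_3D_map_alt s row column k c width height depth).toList := by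
  set L := s.toList with hL
  have hlen : PySem.Str.len s = (L.length : Int) := PySem.Str.len_eq s
  have hguard : ¬(0 ≤ row ∧ row < height ∧ 0 ≤ column ∧ column < width ∧ 0 ≤ k ∧ k < depth) := by
    rintro ⟨h1, h2, h3, h4, h5, h6⟩
    exact hmain ⟨le_of_lt (mul_pos (lt_of_le_of_lt h3 h4) (lt_of_le_of_lt h1 h2)), by omega⟩
  have hBt : width * height * depth = 0 ∨ width * height * depth ≤ -(L.length : Int) := by
    rcases hpre with h | ⟨hdneg, hle⟩ | ⟨hdpos, hwhle⟩
    · exact Or.inl h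
    · rw [hlen] at hle
      exact Or.inr hle
    · rw [hlen] at hwhle
      right
      nlinarith
  have hB : (change_char_in_3D_map_alt s row column k c width height depth).toList = [] := by
    simp only [change_char_in_3D_map_alt]
    rw [if_neg hguard, PySem.Str.toList_slice, PySem.Chars.slice_eq_listSlice]
    exact pv_slice_to_empty L _ hBt
  rw [hB, pv_A_toList]
  rcases (by omega : depth ≤ 0 ∨ 0 < depth) with hd0 | hd0
  · rw [PySem.List.pyRange_one_eq_nil (by omega : depth ≤ (0 : Int))]
    simp
  · have hwhneg : width * height < 0 := by
      by_contra hc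
      exact hmain ⟨by omega, by omega⟩
    have hwhle : width * height ≤ -(L.length : Int) := by
      rcases hpre with h | ⟨hdneg, _⟩ | ⟨_, h⟩
      · exfalso
        nlinarith
      · omega
      · rw [hlen] at h
        exact h
    obtain ⟨d, hdep⟩ : ∃ d : Nat, depth = (d : Int) := ⟨depth.toNat, by omega⟩
    rw [show PySem.List.pyRange 0 depth 1 = (List.range d).map (fun j : Nat => (j : Int)) from by
      rw [hdep]; exact PySem.List.pyRange_zero_natCast d]
    rw [List.flatMap_map]
    rw [List.flatMap_congr (l := List.range d) (g := fun _ => ([] : List Char)) (by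
      intro j hj
      have hjd : (j : Int) < depth := by
        have := List.mem_range.mp hj
        omega
      have hj0 : (j : Int) * width * height ≤ 0 := by
        rw [mul_assoc]
        exact mul_nonpos_of_nonneg_of_nonpos (Int.natCast_nonneg j) (le_of_lt hwhneg)
      have hlay : (pvA_get_nth_map_from_3D_map s (j : Int) width height depth).toList = [] := by
        unfold pvA_get_nth_map_from_3D_map
        rw [if_pos ⟨Int.natCast_nonneg j, hjd⟩, PySem.Str.toList_slice,
            PySem.Chars.slice_eq_listSlice]
        apply pv_slice_ab_empty
        · linarith
        · linarith
      by_cases hjk : (j : Int) ≠ k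
      · rw [if_pos hjk]
        exact hlay
      · rw [if_neg hjk]
        unfold pvA_change_char_in_map
        rw [if_neg (by
          rintro ⟨h1, h2, h3, h4⟩
          nlinarith [mul_pos (lt_of_le_of_lt h3 h4) (lt_of_le_of_lt h1 h2)])]
        exact hlay)]
    simp

-- ===== VERDICT (by name: the statement is the Claim_ definition above) =====
theorem change_char_in_3D_map_spec : Claim_equal_change_char_in_3D_map := by
  intro s row column k c width height depth _ hpre
  unfold Pre_change_char_in_3D_map at hpre
  unfold Spec_change_char_in_3D_map
  apply String.toList_inj.mp
  by_cases hmain : 0 ≤ width * height ∧ 0 ≤ depth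
  · exact pv_main s row column k c width height depth hmain.1 hmain.2
  · rcases hpre with h | h | h | h
    · exact absurd h hmain
    · exact pv_corner s row column k c width height depth hmain (Or.inl h)
    · exact pv_corner s row column k c width height depth hmain (Or.inr (Or.inl h))
    · exact pv_corner s row column k c width height depth hmain (Or.inr (Or.inr h))
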